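-- pv_equiv track=rewrite | github.com/Abhinavbajpai30/HackX | backend/discrepancy_utils.py | check_line_item_description_mismatches
-- ===== SOURCE A (Python) =====
-- def check_line_item_description_mismatches(po, inv):
--     flags = {
--         "Description text mismatches": 0,
--         "Specification mismatches": 0,
--         "Brand differences": 0,
--         "Wrong product": 0,
--     }
--
--     for po_li, inv_li in zip(po.get("line_items", []), inv.get("line_items", [])):
--         if po_li.get("description") and inv_li.get("description") and po_li["description"].strip().lower() != inv_li["description"].strip().lower():
--             flags["Description text mismatches"] = 1
--         if po_li.get("spec") and inv_li.get("spec") and po_li["spec"] != inv_li["spec"]: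
--             flags["Specification mismatches"] = 1
--         if po_li.get("brand") and inv_li.get("brand") and po_li["brand"] != inv_li["brand"]:
--             flags["Brand differences"] = 1
--         if po_li.get("part_number") and inv_li.get("part_number") and po_li["part_number"] != inv_li["part_number"]:
--             flags["Wrong product"] = 1
--
--     return flags, sum(flags.values())
-- ===== SOURCE B (Python) =====
-- def check_line_item_description_mismatches(po, inv):
--     pairs = list(zip(po.get("line_items", []), inv.get("line_items", [])))
--
--     def norm(s):
--         return s.strip().lower()
--
--     desc = int(any(p.get("description") and i.get("description")
--                    and norm(p["description"]) != norm(i["description"])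
--                    for p, i in pairs))
--     spec = int(any(p.get("spec") and i.get("spec") and p["spec"] != i["spec"]
--                    for p, i in pairs))
--     brand = int(any(p.get("brand") and i.get("brand") and p["brand"] != i["brand"]
--                     for p, i in pairs))
--     part = int(any(p.get("part_number") and i.get("part_number")
--                    and p["part_number"] != i["part_number"]
--                    for p, i in pairs))
--
--     flags = {
--         "Description text mismatches": desc,
--         "Specification mismatches": spec,
--         "Brand differences": brand,
--         "Wrong product": part,
--     }
--     return flags, desc + spec + brand + part
-- ===== Notes on version B (the rewrite author's own statement) =====
-- stated objective: idiomatic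
-- what changed: Replaces the single fused loop that mutates a flags dict with four independent short-circuiting any() passes over the zipped pairs, one per field, building the flags dict once from the four results.
import Mathlib
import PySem

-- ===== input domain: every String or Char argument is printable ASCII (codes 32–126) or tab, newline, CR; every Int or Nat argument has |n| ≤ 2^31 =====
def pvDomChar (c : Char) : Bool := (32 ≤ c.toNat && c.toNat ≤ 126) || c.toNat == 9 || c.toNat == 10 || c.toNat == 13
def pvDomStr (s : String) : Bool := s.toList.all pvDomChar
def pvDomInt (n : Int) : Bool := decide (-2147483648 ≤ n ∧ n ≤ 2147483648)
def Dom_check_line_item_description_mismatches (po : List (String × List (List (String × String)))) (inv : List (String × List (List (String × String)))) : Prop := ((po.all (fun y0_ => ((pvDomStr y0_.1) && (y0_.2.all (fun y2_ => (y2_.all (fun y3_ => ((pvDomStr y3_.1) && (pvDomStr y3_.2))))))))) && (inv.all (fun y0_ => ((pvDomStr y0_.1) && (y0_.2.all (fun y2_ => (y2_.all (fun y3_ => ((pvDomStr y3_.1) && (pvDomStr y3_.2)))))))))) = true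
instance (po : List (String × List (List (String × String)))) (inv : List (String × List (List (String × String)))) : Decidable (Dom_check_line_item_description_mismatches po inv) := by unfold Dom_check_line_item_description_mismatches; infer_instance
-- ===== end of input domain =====

-- B restructures A's single fused flag-mutating loop into four independent per-field any() passes; objective: idiomatic.

-- shared guard helpers: each is the literal guard expression both Pythons use per pair
-- (truthiness of .get on a str-valued dict = some nonempty string)
def pvDescGuard (p i : List (String × String)) : Bool :=
  match (PySem.Dict.mk p).get? "description", (PySem.Dict.mk i).get? "description" with
  | some a, some b =>
      a ≠ "" && b ≠ "" &&
      PySem.Str.lower (PySem.Str.strip a) ≠ PySem.Str.lower (PySem.Str.strip b)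
  | _, _ => false

def pvEqGuard (key : String) (p i : List (String × String)) : Bool :=
  match (PySem.Dict.mk p).get? key, (PySem.Dict.mk i).get? key with
  | some a, some b => a ≠ "" && b ≠ "" && a ≠ b
  | _, _ => false

-- ===== PORT A =====
def check_line_item_description_mismatches (po : List (String × List (List (String × String)))) (inv : List (String × List (List (String × String)))) : (List (String × Int)) × Int :=
  let flags0 : PySem.Dict String Int := PySem.Dict.mk
    [("Description text mismatches", 0), ("Specification mismatches", 0),
     ("Brand differences", 0), ("Wrong product", 0)]
  let pairs := ((PySem.Dict.mk po).getD "line_items" []).zip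
               ((PySem.Dict.mk inv).getD "line_items" [])
  let flags := pairs.foldl (fun fl pr =>
    let fl := if pvDescGuard pr.1 pr.2 then fl.insert "Description text mismatches" 1 else fl
    let fl := if pvEqGuard "spec" pr.1 pr.2 then fl.insert "Specification mismatches" 1 else fl
    let fl := if pvEqGuard "brand" pr.1 pr.2 then fl.insert "Brand differences" 1 else fl
    if pvEqGuard "part_number" pr.1 pr.2 then fl.insert "Wrong product" 1 else fl) flags0
  (flags.items, flags.values.sum)

-- ===== PORT B =====
def check_line_item_description_mismatches_alt (po : List (String × List (List (String × String)))) (inv : List (String × List (List (String × String)))) : (List (String × Int)) × Int :=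
  let pairs := ((PySem.Dict.mk po).getD "line_items" []).zip
               ((PySem.Dict.mk inv).getD "line_items" [])
  let desc : Int := if pairs.any (fun pr => pvDescGuard pr.1 pr.2) then 1 else 0
  let spec : Int := if pairs.any (fun pr => pvEqGuard "spec" pr.1 pr.2) then 1 else 0
  let brand : Int := if pairs.any (fun pr => pvEqGuard "brand" pr.1 pr.2) then 1 else 0
  let part : Int := if pairs.any (fun pr => pvEqGuard "part_number" pr.1 pr.2) then 1 else 0
  ([("Description text mismatches", desc), ("Specification mismatches", spec),
    ("Brand differences", brand), ("Wrong product", part)],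
   desc + spec + brand + part)

-- ===== PRECONDITION & SPEC =====
def Spec_check_line_item_description_mismatches (po : List (String × List (List (String × String)))) (inv : List (String × List (List (String × String)))) (out : (List (String × Int)) × Int) : Prop := out = check_line_item_description_mismatches_alt po inv
instance (po : List (String × List (List (String × String)))) (inv : List (String × List (List (String × String)))) (out : (List (String × Int)) × Int) : Decidable (Spec_check_line_item_description_mismatches po inv out) := by unfold Spec_check_line_item_description_mismatches; infer_instance

-- ===== CLAIM (what is proved, stated in full; the proofs are below) =====
def Claim_equal_check_line_item_description_mismatches : Prop := ∀ (po : List (String × List (List (String × String)))) (inv : List (String × List (List (String × String)))), Dom_check_line_item_description_mismatches po inv → Spec_check_line_item_description_mismatches po inv (check_line_item_description_mismatches po inv)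

-- ===== LEMMAS AND PROOFS =====

theorem pv_if_or (A B : Bool) (d : Int) :
    (if A then (1 : Int) else if B then 1 else d) = if (B || A) then 1 else d := by
  cases A <;> cases B <;> simp

theorem pv_fold_flags (l : List (List (String × String) × List (String × String)))
    (d s b p : Int) :
    l.foldl (fun fl pr =>
      let fl := if pvDescGuard pr.1 pr.2 then PySem.Dict.insert fl "Description text mismatches" 1 else fl
      let fl := if pvEqGuard "spec" pr.1 pr.2 then PySem.Dict.insert fl "Specification mismatches" 1 else fl
      let fl := if pvEqGuard "brand" pr.1 pr.2 then PySem.Dict.insert fl "Brand differences" 1 else fl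
      if pvEqGuard "part_number" pr.1 pr.2 then PySem.Dict.insert fl "Wrong product" 1 else fl)
      (PySem.Dict.mk [("Description text mismatches", d), ("Specification mismatches", s),
                      ("Brand differences", b), ("Wrong product", p)])
    = PySem.Dict.mk
        [("Description text mismatches", if l.any (fun pr => pvDescGuard pr.1 pr.2) then 1 else d),
         ("Specification mismatches", if l.any (fun pr => pvEqGuard "spec" pr.1 pr.2) then 1 else s),
         ("Brand differences", if l.any (fun pr => pvEqGuard "brand" pr.1 pr.2) then 1 else b),
         ("Wrong product", if l.any (fun pr => pvEqGuard "part_number" pr.1 pr.2) then 1 else p)] := by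
  induction l generalizing d s b p with
  | nil => simp
  | cons h t ih =>
    simp only [List.foldl_cons, List.any_cons]
    rw [show (let fl := if pvDescGuard h.1 h.2 then PySem.Dict.insert (PySem.Dict.mk [("Description text mismatches", d), ("Specification mismatches", s), ("Brand differences", b), ("Wrong product", p)]) "Description text mismatches" 1 else PySem.Dict.mk [("Description text mismatches", d), ("Specification mismatches", s), ("Brand differences", b), ("Wrong product", p)];
             let fl := if pvEqGuard "spec" h.1 h.2 then PySem.Dict.insert fl "Specification mismatches" 1 else fl;
             let fl := if pvEqGuard "brand" h.1 h.2 then PySem.Dict.insert fl "Brand differences" 1 else fl;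
             if pvEqGuard "part_number" h.1 h.2 then PySem.Dict.insert fl "Wrong product" 1 else fl)
          = PySem.Dict.mk [("Description text mismatches", if pvDescGuard h.1 h.2 then 1 else d),
                           ("Specification mismatches", if pvEqGuard "spec" h.1 h.2 then 1 else s),
                           ("Brand differences", if pvEqGuard "brand" h.1 h.2 then 1 else b),
                           ("Wrong product", if pvEqGuard "part_number" h.1 h.2 then 1 else p)] from by
      cases pvDescGuard h.1 h.2 <;> cases pvEqGuard "spec" h.1 h.2 <;>
        cases pvEqGuard "brand" h.1 h.2 <;> cases pvEqGuard "part_number" h.1 h.2 <;>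
        simp [PySem.Dict.insert]]
    rw [ih]
    simp only [pv_if_or]
    rfl

-- ===== VERDICT (by name: the statement is the Claim_ definition above) =====
theorem check_line_item_description_mismatches_spec : Claim_equal_check_line_item_description_mismatches := by
  intro po inv _
  unfold Spec_check_line_item_description_mismatches
  unfold check_line_item_description_mismatches check_line_item_description_mismatches_alt
  simp only [pv_fold_flags]
  simp [PySem.Dict.values]
  ring
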